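-- pv_equiv track=rewrite | github.com/ahinko/tcpsolis2mqtt | app/app.py | map_bit_to_value
-- ===== SOURCE A (Python) =====
-- def map_bit_to_value(mapping, default_value, binary_string):
--     # Remove '0b' prefix if present
--     if binary_string.startswith("0b"):
--         binary_string = binary_string[2:]
--
--     active = []
--     for i in range(min(len(binary_string), 16)):
--         if binary_string[-(i + 1)] == "1":
--             for value, status in mapping.items():
--                 if value == i:
--                     active.append(status)
--
--     if active:
--         return ", ".join(active)
--     else:
--         return default_value
-- ===== SOURCE B (Python) =====
-- def map_bit_to_value(mapping, default_value, binary_string):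
--     # Remove '0b' prefix if present
--     if binary_string.startswith("0b"):
--         binary_string = binary_string[2:]
--
--     n = min(len(binary_string), 16)
--     matches = [(value, status) for value, status in mapping.items()
--                if 0 <= value < n and binary_string[-(value + 1)] == "1"]
--     matches.sort(key=lambda p: p[0])
--     if matches:
--         return ", ".join(status for _, status in matches)
--     return default_value
-- ===== Notes on version B (the rewrite author's own statement) =====
-- stated objective: alternative
-- what changed: B iterates once over mapping.items() collecting the (bit, status) pairs whose bit is set in the string, then sorts the matches by bit index and joins, instead of A's loop over bit positions with an inner scan of the whole mapping at every set bit.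
import Mathlib
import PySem

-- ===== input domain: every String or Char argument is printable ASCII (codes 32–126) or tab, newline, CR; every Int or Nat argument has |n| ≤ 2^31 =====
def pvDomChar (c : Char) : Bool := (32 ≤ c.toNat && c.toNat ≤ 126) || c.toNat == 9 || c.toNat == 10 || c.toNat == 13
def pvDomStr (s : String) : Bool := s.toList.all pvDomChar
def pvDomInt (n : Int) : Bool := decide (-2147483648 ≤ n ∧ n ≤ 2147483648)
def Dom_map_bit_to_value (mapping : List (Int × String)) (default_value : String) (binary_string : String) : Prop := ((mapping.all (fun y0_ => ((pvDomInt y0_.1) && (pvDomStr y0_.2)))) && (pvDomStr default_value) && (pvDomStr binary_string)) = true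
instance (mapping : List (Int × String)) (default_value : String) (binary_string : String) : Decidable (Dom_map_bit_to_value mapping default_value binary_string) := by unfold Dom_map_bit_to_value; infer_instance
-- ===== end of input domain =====

-- B makes one pass over mapping.items() collecting the (bit, status) pairs whose bit is set,
-- sorts the pairs by bit index and joins, instead of A's per-bit inner scan of the mapping
-- (objective: alternative).

-- ===== PORT A =====
-- mapping is a Python dict; per the convention it arrives as an association list and is
-- realised as PySem.Dict.ofList (duplicate keys collapse exactly as a Python dict does).
def map_bit_to_value (mapping : List (Int × String)) (default_value : String) (binary_string : String) : String :=
  let bs := if PySem.Str.startswith binary_string "0b"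
            then PySem.Str.slice binary_string (some 2) none
            else binary_string
  let m := PySem.Dict.ofList mapping
  let active :=
    (PySem.List.pyRange 0 (min (PySem.Str.len bs) 16) 1).foldl
      (fun active i =>
        if PySem.Str.pyGet? bs (-(i + 1)) = some '1' then
          m.items.foldl (fun active p => if p.1 == i then active ++ [p.2] else active) active
        else active) []
  if active ≠ [] then PySem.Str.join ", " active else default_value

-- ===== PORT B =====
def map_bit_to_value_alt (mapping : List (Int × String)) (default_value : String) (binary_string : String) : String :=
  let bs := if PySem.Str.startswith binary_string "0b"
            then PySem.Str.slice binary_string (some 2) none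
            else binary_string
  let n := min (PySem.Str.len bs) 16
  let pairs := (PySem.Dict.ofList mapping).items.filter
      (fun p => decide (0 ≤ p.1 ∧ p.1 < n) && (PySem.Str.pyGet? bs (-(p.1 + 1)) == some '1'))
  let sm := PySem.List.sorted pairs (fun p => p.1) false
  if sm ≠ [] then PySem.Str.join ", " (sm.map Prod.snd) else default_value

-- ===== PRECONDITION & SPEC =====
def Spec_map_bit_to_value (mapping : List (Int × String)) (default_value : String) (binary_string : String) (out : String) : Prop := out = map_bit_to_value_alt mapping default_value binary_string
instance (mapping : List (Int × String)) (default_value : String) (binary_string : String) (out : String) : Decidable (Spec_map_bit_to_value mapping default_value binary_string out) := by unfold Spec_map_bit_to_value; infer_instance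

-- ===== CLAIM (what is proved, stated in full; the proofs are below) =====
def Claim_equal_map_bit_to_value : Prop := ∀ (mapping : List (Int × String)) (default_value : String) (binary_string : String), Dom_map_bit_to_value mapping default_value binary_string → Spec_map_bit_to_value mapping default_value binary_string (map_bit_to_value mapping default_value binary_string)

-- ===== LEMMAS AND PROOFS =====

-- With unique keys, filtering the items at key i and taking the statuses is the lookup.
theorem pv_filter_snd_eq_get (i : Int) :
    ∀ (l : List (Int × String)), (l.map Prod.fst).Nodup →
      (l.filter (fun p => p.1 == i)).map Prod.snd = (PySem.Dict.get? ⟨l⟩ i).toList := by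
  intro l
  induction l with
  | nil => intro _; simp [PySem.Dict.get?]
  | cons hd tl ih =>
    intro hnd
    obtain ⟨k, v⟩ := hd
    simp only [List.map_cons, List.nodup_cons] at hnd
    rw [PySem.Dict.get?_mk_cons]
    by_cases hk : (k == i) = true
    · have hki : k = i := eq_of_beq hk
      have htl : tl.filter (fun p => p.1 == i) = [] := by
        apply List.filter_eq_nil_iff.mpr
        intro p hp hpi
        exact hnd.1 (by rw [hki, ← eq_of_beq hpi]; exact List.mem_map_of_mem hp)
      simp [hk, htl]
    · simp [hk, ih hnd.2]

-- A's double loop equals the map-snd of the (bit, status) pairs in ascending bit order.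
theorem pv_loopA_eq (P : Int → Prop) [DecidablePred P] (m : PySem.Dict Int String)
    (hnd : m.keys.Nodup) :
    ∀ (L : List Int) (acc : List String),
      L.foldl (fun active i =>
          if P i then
            m.items.foldl (fun active p => if p.1 == i then active ++ [p.2] else active) active
          else active) acc
        = acc ++ (L.filterMap (fun i => if P i then (m.get? i).map (fun s => (i, s)) else none)).map Prod.snd := by
  intro L
  induction L with
  | nil => intro acc; simp
  | cons i t ih =>
    intro acc
    simp only [List.foldl_cons, List.filterMap_cons]
    by_cases hP : P i
    · rw [if_pos hP]
      rw [PySem.List.foldl_append_if (fun p => p.1 == i) Prod.snd m.items acc]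
      rw [pv_filter_snd_eq_get i m.items hnd]
      rw [ih]
      cases h : m.get? i <;> simp [hP]
    · rw [if_neg hP, ih]
      simp [hP]

-- B's sort of the filtered items IS that ascending-bit-order list of pairs.
theorem pv_sorted_eq (n : Int) (P : Int → Prop) [DecidablePred P] (m : PySem.Dict Int String)
    (hnd : m.keys.Nodup) :
    PySem.List.sorted
        (m.items.filter (fun p => decide (0 ≤ p.1 ∧ p.1 < n) && decide (P p.1)))
        (fun p => p.1) false
      = (PySem.List.pyRange 0 n 1).filterMap
          (fun i => if P i then (m.get? i).map (fun s => (i, s)) else none) := by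
  set g : Int → Option (Int × String) :=
    fun i => if P i then (m.get? i).map (fun s => (i, s)) else none with hg
  have hkey : ∀ (i : Int) (p : Int × String), g i = some p → p.1 = i := by
    intro i p hp
    simp only [hg] at hp
    split at hp
    · cases h : m.get? i <;> simp [h] at hp; simp [← hp]
    · exact absurd hp (by simp)
  apply PySem.List.sorted_eq_of_perm_of_pairwise_lt
  · -- permutation: both are nodup with the same members
    have hitems_nd : m.items.Nodup := (List.Nodup.of_map Prod.fst) hnd
    have hF_nd : (m.items.filter (fun p => decide (0 ≤ p.1 ∧ p.1 < n) && decide (P p.1))).Nodup :=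
      hitems_nd.filter _
    have hLA_pw : ((PySem.List.pyRange 0 n 1).filterMap g).Pairwise (fun a b => a.1 < b.1) := by
      apply List.Pairwise.filterMap g ?_ (PySem.List.pairwise_lt_pyRange_one 0 n)
      intro i j hij p hp q hq
      rw [hkey i p hp, hkey j q hq]; exact hij
    have hLA_nd : ((PySem.List.pyRange 0 n 1).filterMap g).Nodup :=
      hLA_pw.imp (fun h => by intro he; rw [he] at h; exact lt_irrefl _ h)
    have hmem : ∀ p : Int × String,
        p ∈ (PySem.List.pyRange 0 n 1).filterMap g ↔
        p ∈ m.items.filter (fun q => decide (0 ≤ q.1 ∧ q.1 < n) && decide (P q.1)) := by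
      intro p
      rw [List.mem_filterMap, List.mem_filter]
      constructor
      · rintro ⟨i, hi, hgi⟩
        have hpi : p.1 = i := hkey i p hgi
        simp only [hg] at hgi
        rw [PySem.List.mem_pyRange_one] at hi
        split at hgi
        · cases h : m.get? i with
          | none => rw [h] at hgi; simp at hgi
          | some v =>
            rw [h] at hgi; simp at hgi
            refine ⟨?_, ?_⟩
            · rw [← hgi]
              exact PySem.Dict.mem_items_of_get?_eq_some (d := m) h
            · simp [hpi, hi.1, hi.2]; assumption
        · exact absurd hgi (by simp)
      · rintro ⟨hpit, hcond⟩
        simp only [Bool.and_eq_true, decide_eq_true_eq] at hcond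
        refine ⟨p.1, ?_, ?_⟩
        · rw [PySem.List.mem_pyRange_one]; omega
        · simp only [hg, if_pos hcond.2]
          have : m.get? p.1 = some p.2 :=
            PySem.Dict.get?_of_mem_items (d := m) (by simpa using hpit) hnd
          simp [this]
      
    exact List.perm_of_nodup_nodup_toFinset_eq hLA_nd hF_nd
      (Finset.ext (fun p => by simp only [List.mem_toFinset]; exact hmem p))
  · -- strictly increasing keys
    apply List.Pairwise.filterMap g ?_ (PySem.List.pairwise_lt_pyRange_one 0 n)
    intro i j hij p hp q hq
    rw [hkey i p hp, hkey j q hq]; exact hij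

-- ===== VERDICT (by name: the statement is the Claim_ definition above) =====
theorem map_bit_to_value_spec : Claim_equal_map_bit_to_value := by
  intro mapping default_value binary_string _
  unfold Spec_map_bit_to_value map_bit_to_value map_bit_to_value_alt
  simp only []
  set bs := (if PySem.Str.startswith binary_string "0b" = true
             then PySem.Str.slice binary_string (some 2) none
             else binary_string) with hbs
  rw [pv_loopA_eq (fun i => PySem.Str.pyGet? bs (-(i + 1)) = some '1')
        (PySem.Dict.ofList mapping) (PySem.Dict.nodup_keys_ofList mapping)]
  simp only [beq_eq_decide]
  rw [pv_sorted_eq (min (PySem.Str.len bs) 16)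
        (fun i => PySem.Str.pyGet? bs (-(i + 1)) = some '1')
        (PySem.Dict.ofList mapping) (PySem.Dict.nodup_keys_ofList mapping)]
  simp
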